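-- pv_equiv track=rewrite | github.com/YYLMike/dementia_text | data_preprocess.py | split_punctuation
-- ===== SOURCE A (Python) =====
-- import string
--
-- punctuation = set(string.punctuation+"，"+"、"+"」"+"「"+"。"+" "+"！")
--
-- def split_punctuation(sentence):
--     sentence_split = []
--     tmp = ''
--     for i in sentence:
--         if i not in punctuation:
--             tmp += i
--         else:
--             sentence_split.append(tmp)
--             tmp = ''
--     return sentence_split
-- ===== SOURCE B (Python) =====
-- import string
--
-- punctuation = set(string.punctuation+"，"+"、"+"」"+"「"+"。"+" "+"！")
--
-- def split_punctuation(sentence):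
--     idxs = [i for i, ch in enumerate(sentence) if ch in punctuation]
--     out = []
--     prev = 0
--     for p in idxs:
--         out.append(sentence[prev:p])
--         prev = p + 1
--     return out
-- ===== Notes on version B (the rewrite author's own statement) =====
-- stated objective: alternative
-- what changed: B first collects the indices of all punctuation characters in one scan and then slices the sentence between consecutive punctuation positions (dropping the trailing text), instead of A's single accumulator loop that grows a temporary string character by character.
import Mathlib
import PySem

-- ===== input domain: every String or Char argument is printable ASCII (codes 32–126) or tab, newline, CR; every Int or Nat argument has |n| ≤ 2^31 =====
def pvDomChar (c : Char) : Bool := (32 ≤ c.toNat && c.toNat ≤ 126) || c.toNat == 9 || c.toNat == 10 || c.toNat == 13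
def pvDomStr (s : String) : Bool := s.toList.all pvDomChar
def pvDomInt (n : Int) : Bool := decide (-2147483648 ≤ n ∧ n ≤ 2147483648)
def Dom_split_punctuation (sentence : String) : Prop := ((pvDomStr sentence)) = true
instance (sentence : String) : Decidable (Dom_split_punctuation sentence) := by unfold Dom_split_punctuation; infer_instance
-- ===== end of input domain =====

-- B finds all punctuation positions in one scan, then slices the sentence between
-- consecutive positions (dropping the trailing text), instead of A's char-by-char
-- accumulator loop; objective: alternative decomposition, same cost.

-- ===== PORT A =====
-- the module-level `punctuation` set (string.punctuation plus the CJK marks and space)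
def pvPunct : List Char := "!\"#$%&'()*+,-./:;<=>?@[\\]^_`{|}~，、」「。 ！".toList

def pvIsPunct (c : Char) : Bool := pvPunct.contains c

def split_punctuation (sentence : String) : List String :=
  (sentence.toList.foldl
    (fun (st : List String × String) i =>
      if ¬ pvIsPunct i then (st.1, st.2.push i)
      else (st.1 ++ [st.2], ""))
    ([], "")).1

-- ===== PORT B =====
def split_punctuation_alt (sentence : String) : List String :=
  ((((PySem.List.enumerate sentence.toList 0).filter (fun p => pvIsPunct p.2)).map (·.1)).foldl
    (fun (st : List String × Int) p =>
      (st.1 ++ [String.ofList (PySem.List.slice sentence.toList (some st.2) (some p))], p + 1))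
    ([], 0)).1

-- ===== PRECONDITION & SPEC =====
def Spec_split_punctuation (sentence : String) (out : List String) : Prop := out = split_punctuation_alt sentence
instance (sentence : String) (out : List String) : Decidable (Spec_split_punctuation sentence out) := by unfold Spec_split_punctuation; infer_instance

-- ===== CLAIM (what is proved, stated in full; the proofs are below) =====
def Claim_equal_split_punctuation : Prop := ∀ (sentence : String), Dom_split_punctuation sentence → Spec_split_punctuation sentence (split_punctuation sentence)

-- ===== LEMMAS AND PROOFS =====

-- common specification: segments before each punctuation char, trailing text dropped
def pvSegs : List Char → List Char → List String
  | _, [] => []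
  | tmp, c :: cs => if pvIsPunct c then String.ofList tmp :: pvSegs [] cs else pvSegs (tmp ++ [c]) cs

lemma pvA_foldl (cs : List Char) : ∀ (acc : List String) (tmp : String),
    (cs.foldl (fun (st : List String × String) i =>
        if ¬ pvIsPunct i then (st.1, st.2.push i)
        else (st.1 ++ [st.2], "")) (acc, tmp)).1 = acc ++ pvSegs tmp.toList cs := by
  induction cs with
  | nil => intro acc tmp; simp [pvSegs]
  | cons c cs ih =>
    intro acc tmp
    by_cases h : pvIsPunct c = true
    · simpa [pvSegs, h] using ih (acc ++ [tmp]) ""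
    · simpa [pvSegs, h, String.toList_push] using ih acc (tmp.push c)

-- the absolute punctuation indices of cs, positions counted from s
def pvIdxs (s : Int) : List Char → List Int
  | [] => []
  | c :: cs => if pvIsPunct c then s :: pvIdxs (s + 1) cs else pvIdxs (s + 1) cs

lemma pvIdxs_enum (cs : List Char) : ∀ s : Int,
    ((PySem.List.enumerate cs s).filter (fun p => pvIsPunct p.2)).map (·.1) = pvIdxs s cs := by
  induction cs with
  | nil => intro s; simp [pvIdxs, PySem.List.enumerate_nil]
  | cons c cs ih =>
    intro s
    by_cases h : pvIsPunct c = true <;>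
      simp [pvIdxs, PySem.List.enumerate_cons, h, ih]

lemma pvB_foldl (cs : List Char) : ∀ (tmp : List Char) (prev : Nat) (out : List String)
    (full : List Char), List.drop prev full = tmp ++ cs →
    ((pvIdxs ((prev : Int) + tmp.length) cs).foldl
        (fun (st : List String × Int) p =>
          (st.1 ++ [String.ofList (PySem.List.slice full (some st.2) (some p))], p + 1))
        (out, (prev : Int))).1 = out ++ pvSegs tmp cs := by
  induction cs with
  | nil => intro tmp prev out full _; simp [pvIdxs, pvSegs]
  | cons c cs ih =>
    intro tmp prev out full hdrop
    by_cases h : pvIsPunct c = true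
    · have hslice : PySem.List.slice full (some (prev : Int))
          (some ((prev : Int) + (tmp.length : Int))) = tmp := by
        rw [PySem.List.slice_natCast_add, hdrop]
        simp
      have hdrop' : List.drop (prev + tmp.length + 1) full = cs := by
        have h1 : List.drop (tmp.length + 1) (List.drop prev full) = cs := by
          rw [hdrop]; simp
        rw [List.drop_drop] at h1
        rw [show prev + tmp.length + 1 = prev + (tmp.length + 1) from by omega]
        exact h1
      have ihx := ih [] (prev + tmp.length + 1) (out ++ [String.ofList tmp]) full (by simpa using hdrop')
      simp only [pvIdxs, pvSegs, h, if_true, List.foldl_cons, hslice]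
      rw [show (prev : Int) + (tmp.length : Int) + 1 = ((prev + tmp.length + 1 : Nat) : Int) by push_cast; ring]
      simpa using ihx
    · have hdrop' : List.drop prev full = (tmp ++ [c]) ++ cs := by simpa using hdrop
      have ihx := ih (tmp ++ [c]) prev out full hdrop'
      simp only [pvIdxs, pvSegs, h, if_false, Bool.false_eq_true]
      rw [show (prev : Int) + (tmp.length : Int) + 1 = (prev : Int) + (((tmp ++ [c]).length : Nat) : Int) by simp; ring]
      simpa using ihx

-- ===== VERDICT (by name: the statement is the Claim_ definition above) =====
theorem split_punctuation_spec : Claim_equal_split_punctuation := by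
  intro sentence _
  unfold Spec_split_punctuation split_punctuation split_punctuation_alt
  rw [pvA_foldl, pvIdxs_enum]
  have := pvB_foldl sentence.toList [] 0 [] sentence.toList (by simp)
  simpa using this.symm
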